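-- pv_equiv track=rewrite | github.com/theodoreln/sankey_diagram | Sankey_Diagram.py | clean_flow
-- ===== SOURCE A (Python) =====
-- def clean_flow(source, target, value, flow_color) :
--     flow = list(zip(source, target))
--     source2 = []
--     target2 = []
--     value2 = []
--     flow_color2 = []
--     for i in range(len(flow)) :
--         if value[i] != 0 :
--             flow2 = list(zip(source2, target2))
--             if flow[i] in flow2 :
--                 index = flow2.index(flow[i])
--                 value2[index] = value2[index] + value[i]
--             else :
--                 source2.append(flow[i][0])
--                 target2.append(flow[i][1])
--                 value2.append(value[i])
--                 flow_color2.append(flow_color[i])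
--     return(source2, target2, value2, flow_color2)
-- ===== SOURCE B (Python) =====
-- def clean_flow(source, target, value, flow_color):
--     rows = list(zip(source, target, value, flow_color))
--     # pass 1: distinct (source, target) keys of nonzero-valued rows, in first-occurrence
--     # order, with the color of that first nonzero occurrence
--     keys = []
--     colors = []
--     for s, t, v, c in rows:
--         if v != 0 and (s, t) not in keys:
--             keys.append((s, t))
--             colors.append(c)
--     # pass 2: each aggregated value is the column sum of all rows carrying that key
--     # (rows with value 0 contribute nothing, so this equals the nonzero-only sum)
--     value2 = [sum(v for s, t, v, _ in rows if (s, t) == k) for k in keys]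
--     source2 = [s for s, _ in keys]
--     target2 = [t for _, t in keys]
--     return (source2, target2, value2, colors)
-- ===== Notes on version B (the rewrite author's own statement) =====
-- stated objective: alternative
-- what changed: Replaces A's single online pass that mutates value2 via a rebuilt zip and linear .index scan with a two-phase group-by: a first pass collecting distinct nonzero (source,target) keys with their first color, then a separate per-key summation pass that computes each aggregated value as an independent column sum over all rows, so no value accumulator is maintained during the scan.
-- outside the precondition, e.g. on clean_flow(['a'], ['x'], [0], []): A returns ([], [], [], []), B returns ([], [], [], [])
import Mathlib
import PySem

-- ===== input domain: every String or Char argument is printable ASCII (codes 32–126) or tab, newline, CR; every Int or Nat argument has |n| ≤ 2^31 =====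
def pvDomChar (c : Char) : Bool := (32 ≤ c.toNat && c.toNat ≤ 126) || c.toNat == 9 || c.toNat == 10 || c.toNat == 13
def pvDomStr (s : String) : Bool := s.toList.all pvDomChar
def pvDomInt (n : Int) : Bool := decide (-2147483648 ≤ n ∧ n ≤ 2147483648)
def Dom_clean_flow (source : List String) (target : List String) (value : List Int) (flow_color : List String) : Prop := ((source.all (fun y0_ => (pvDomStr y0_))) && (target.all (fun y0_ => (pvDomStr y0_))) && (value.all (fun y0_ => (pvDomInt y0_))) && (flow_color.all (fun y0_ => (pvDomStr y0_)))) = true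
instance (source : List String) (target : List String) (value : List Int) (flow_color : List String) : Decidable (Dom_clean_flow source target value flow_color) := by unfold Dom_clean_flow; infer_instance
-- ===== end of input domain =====

-- B replaces A's online pass (mutating value2 via a rebuilt zip + linear index scan) with a
-- two-phase group-by: one pass selecting distinct nonzero keys with their first color, then a
-- separate per-key summation pass computing each value as a column sum over all rows (alternative, not faster).
-- Pre_ requires value and flow_color to cover every zipped (source,target) pair: on shorter
-- lists A's value[i]/flow_color[i] raises IndexError (except accidentally, when every
-- truncated position is zero-valued or a duplicate flow), while B's zip silently truncates.


-- ===== PORT A =====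
-- A's loop body, named: state is (source2, target2, value2, flow_color2), i the loop index.
def cleanFlowLoop (flow : List (String × String)) (value : List Int) (flow_color : List String)
    (st : List String × List String × List Int × List String) (i : Int) :
    List String × List String × List Int × List String :=
  match PySem.List.pyGet? value i with
  | none => st                                   -- value[i] out of range: Python raises (outside Pre_)
  | some v =>
    if v ≠ 0 then
      -- flow2 = list(zip(source2, target2)); 'flow[i] in flow2' + flow2.index(flow[i]) fused into index?
      let fi := PySem.List.pyGetD flow i ("", "")  -- flow[i]; i is always in range here
      match PySem.List.index? (st.1.zip st.2.1) fi with
      | some idx =>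
        (st.1, st.2.1, st.2.2.1.set idx (st.2.2.1.getD idx 0 + v), st.2.2.2)
      | none =>
        match PySem.List.pyGet? flow_color i with
        | none => st                             -- flow_color[i] out of range: Python raises (outside Pre_)
        | some c => (st.1 ++ [fi.1], st.2.1 ++ [fi.2], st.2.2.1 ++ [v], st.2.2.2 ++ [c])
    else st

def clean_flow (source : List String) (target : List String) (value : List Int) (flow_color : List String) : List String × List String × List Int × List String :=
  let flow := source.zip target
  (PySem.List.pyRange 0 (flow.length : Int) 1).foldl (cleanFlowLoop flow value flow_color) ([], [], [], [])

-- ===== PORT B =====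
-- B's pass 1: fold one row into the (keys, colors) pair — distinct nonzero keys, first color.
def altSelect (acc : List (String × String) × List String)
    (r : String × String × Int × String) : List (String × String) × List String :=
  if r.2.2.1 ≠ 0 ∧ (r.1, r.2.1) ∉ acc.1 then (acc.1 ++ [(r.1, r.2.1)], acc.2 ++ [r.2.2.2]) else acc

-- B's pass 2: sum(v for s, t, v, _ in rows if (s, t) == k)
def altSum (rows : List (String × String × Int × String)) (k : String × String) : Int :=
  ((rows.filter (fun r => (r.1, r.2.1) == k)).map (fun r => r.2.2.1)).sum

def clean_flow_alt (source : List String) (target : List String) (value : List Int) (flow_color : List String) : List String × List String × List Int × List String :=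
  let rows := source.zip (target.zip (value.zip flow_color))
  let kc := rows.foldl altSelect ([], [])
  (kc.1.map Prod.fst, kc.1.map Prod.snd, kc.1.map (altSum rows), kc.2)

-- ===== PRECONDITION & SPEC =====
-- Pre_ excludes value/flow_color lists shorter than the zipped flow list: there A's
-- value[i] / flow_color[i] raises IndexError (except accidentally, when each truncated
-- position holds a zero value or a duplicate flow, where A still returns).
def Pre_clean_flow (source : List String) (target : List String) (value : List Int) (flow_color : List String) : Prop :=
  min source.length target.length ≤ value.length ∧ min source.length target.length ≤ flow_color.length
instance (source : List String) (target : List String) (value : List Int) (flow_color : List String) : Decidable (Pre_clean_flow source target value flow_color) := by unfold Pre_clean_flow; infer_instance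

def pvWitness_clean_flow : List String × List String × List Int × List String :=
  (["a", "b", "a"], ["x", "y", "x"], [1, 2, 3], ["r", "g", "b"])

def Spec_clean_flow (source : List String) (target : List String) (value : List Int) (flow_color : List String) (out : List String × List String × List Int × List String) : Prop := out = clean_flow_alt source target value flow_color
instance (source : List String) (target : List String) (value : List Int) (flow_color : List String) (out : List String × List String × List Int × List String) : Decidable (Spec_clean_flow source target value flow_color out) := by unfold Spec_clean_flow; infer_instance

-- ===== CLAIM (what is proved, stated in full; the proofs are below) =====
def Claim_equal_clean_flow : Prop := ∀ (source : List String) (target : List String) (value : List Int) (flow_color : List String), Dom_clean_flow source target value flow_color → Pre_clean_flow source target value flow_color → Spec_clean_flow source target value flow_color (clean_flow source target value flow_color)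

-- ===== LEMMAS AND PROOFS =====

-- A's "one tuple" step, stated on A's four output lists.
def stepQ (st : List String × List String × List Int × List String)
    (x : String × String × Int × String) : List String × List String × List Int × List String :=
  match x with
  | (s, t, v, c) =>
    if v ≠ 0 then
      match PySem.List.index? (st.1.zip st.2.1) (s, t) with
      | some idx => (st.1, st.2.1, st.2.2.1.set idx (st.2.2.1.getD idx 0 + v), st.2.2.2)
      | none => (st.1 ++ [s], st.2.1 ++ [t], st.2.2.1 ++ [v], st.2.2.2 ++ [c])
    else st

-- A's state after processing the prefix `pre`, expressed through B's two passes.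
def stateOf (pre : List (String × String × Int × String)) :
    List String × List String × List Int × List String :=
  let kc := pre.foldl altSelect ([], [])
  (kc.1.map Prod.fst, kc.1.map Prod.snd, kc.1.map (altSum pre), kc.2)

-- index shift: A's body at index i+1 on cons'ed lists is the body at i on the tails
lemma cleanFlowLoop_shift (fx : String × String) (flow : List (String × String))
    (vx : Int) (vs : List Int) (cx : String) (cs : List String) (i : Int) (hi : 0 ≤ i)
    (st : List String × List String × List Int × List String) :
    cleanFlowLoop (fx :: flow) (vx :: vs) (cx :: cs) st (i + 1)
      = cleanFlowLoop flow vs cs st i := by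
  obtain ⟨k, rfl⟩ : ∃ k : Nat, i = (k : Int) := ⟨i.toNat, (Int.toNat_of_nonneg hi).symm⟩
  have hk : ((k : Int) + 1) = ((k + 1 : Nat) : Int) := by push_cast; ring
  rw [hk]
  simp only [cleanFlowLoop, PySem.List.pyGet?_natCast, PySem.List.pyGetD_natCast,
    List.getElem?_cons_succ, List.getD_cons_succ]

-- range(1, n+1) is range(0, n) shifted by one
lemma pyRange_succ_shift (n : Nat) :
    PySem.List.pyRange 1 ((n : Int) + 1) 1 = (PySem.List.pyRange 0 (n : Int) 1).map (· + 1) := by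
  rw [PySem.List.pyRange_one, PySem.List.pyRange_one, List.map_map]
  have h : ((n : Int) + 1 - 1).toNat = ((n : Int) - 0).toNat := by omega
  rw [h]
  exact List.map_congr_left (fun k _ => by simp; ring)

-- A's index loop over range(len(flow)) equals a fold over the zipped 4-tuples
lemma foldA (source : List String) (target : List String) (value : List Int)
    (color : List String)
    (h1 : (source.zip target).length ≤ value.length)
    (h2 : (source.zip target).length ≤ color.length)
    (st : List String × List String × List Int × List String) :
    (PySem.List.pyRange 0 ((source.zip target).length : Int) 1).foldl
        (cleanFlowLoop (source.zip target) value color) st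
      = (source.zip (target.zip (value.zip color))).foldl stepQ st := by
  induction source generalizing target value color st with
  | nil => simp
  | cons s ss ih =>
    cases target with
    | nil => simp
    | cons t ts =>
      cases value with
      | nil => simp at h1
      | cons v vs =>
        cases color with
        | nil => simp at h2
        | cons c cs =>
          simp only [List.zip_cons_cons, List.length_cons] at *
          rw [PySem.List.pyRange_one_cons (by positivity)]
          simp only [List.foldl_cons, zero_add, Nat.cast_add, Nat.cast_one]
          have hstep : cleanFlowLoop ((s, t) :: ss.zip ts) (v :: vs) (c :: cs) st 0
              = stepQ st (s, t, v, c) := by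
            simp [cleanFlowLoop, stepQ, PySem.List.pyGet?, PySem.List.pyIdx?,
              PySem.List.pyGetD]
          rw [hstep, pyRange_succ_shift, List.foldl_map]
          rw [PySem.List.foldl_congr_mem _ _
            (cleanFlowLoop (ss.zip ts) vs cs) _
            (fun acc i hi => cleanFlowLoop_shift (s, t) (ss.zip ts) v vs c cs i
              (PySem.List.mem_pyRange_one.mp hi).1 acc)]
          exact ih ts vs cs (by omega) (by omega) _

lemma zip_proj (K : List (String × String)) :
    (K.map Prod.fst).zip (K.map Prod.snd) = K := by
  rw [List.zip_map']; simp

-- pass 1 keeps its key list duplicate-free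
lemma select_nodup (xs : List (String × String × Int × String))
    (acc : List (String × String) × List String) (h : acc.1.Nodup) :
    (xs.foldl altSelect acc).1.Nodup := by
  induction xs generalizing acc with
  | nil => exact h
  | cons x xs ih =>
    rw [List.foldl_cons]
    refine ih _ ?_
    simp only [altSelect]
    split_ifs with hg
    · exact List.Nodup.append h (List.nodup_singleton _)
        (List.disjoint_singleton.mpr hg.2)
    · exact h

-- pass 1 never removes a key
lemma select_mono (xs : List (String × String × Int × String))
    (acc : List (String × String) × List String) (a : String × String) (h : a ∈ acc.1) :
    a ∈ (xs.foldl altSelect acc).1 := by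
  induction xs generalizing acc with
  | nil => exact h
  | cons x xs ih =>
    rw [List.foldl_cons]
    refine ih _ ?_
    simp only [altSelect]
    split_ifs with hg
    · exact List.mem_append_left _ h
    · exact h

-- every nonzero-valued row's key ends up in pass 1's key list
lemma select_complete (xs : List (String × String × Int × String))
    (acc : List (String × String) × List String) (r : String × String × Int × String)
    (hr : r ∈ xs) (hv : r.2.2.1 ≠ 0) :
    (r.1, r.2.1) ∈ (xs.foldl altSelect acc).1 := by
  induction xs generalizing acc with
  | nil => simp at hr
  | cons x xs ih =>
    rw [List.foldl_cons]
    rcases List.mem_cons.mp hr with rfl | hr'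
    · apply select_mono
      simp only [altSelect]
      split_ifs with hg
      · exact List.mem_append_right _ (List.mem_singleton_self _)
      · rcases Decidable.not_and_iff_not_or_not.mp hg with h | h
        · exact absurd hv (by simpa using h)
        · simpa using h
    · exact ih _ hr'

-- if every row of pre with key k has value 0, the column sum over pre is 0
lemma sum_zero (pre : List (String × String × Int × String)) (k : String × String)
    (h : ∀ r ∈ pre, (r.1, r.2.1) = k → r.2.2.1 = 0) : altSum pre k = 0 := by
  induction pre with
  | nil => rfl
  | cons r pre ih =>
    have htail : altSum pre k = 0 := ih (fun r' hr' => h r' (List.mem_cons_of_mem _ hr'))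
    by_cases hk : (r.1, r.2.1) = k
    · have hv : r.2.2.1 = 0 := h r List.mem_cons_self hk
      simpa [altSum, List.filter_cons, hk, hv] using htail
    · simpa [altSum, List.filter_cons, hk] using htail

-- appending one row shifts each column sum by that row's (guarded) value
lemma sum_append_one (pre : List (String × String × Int × String))
    (x : String × String × Int × String) (k : String × String) :
    altSum (pre ++ [x]) k = altSum pre k + (if (x.1, x.2.1) = k then x.2.2.1 else 0) := by
  by_cases h : (x.1, x.2.1) = k <;>
    simp [altSum, List.filter_append, h]

-- updating position idx of a mapped column = mapping the pointwise-shifted function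
lemma set_map (K : List (String × String)) (idx : Nat) (f : String × String → Int)
    (a : String × String) (v : Int) (hnd : K.Nodup)
    (hidx : PySem.List.index? K a = some idx) :
    (K.map f).set idx ((K.map f).getD idx 0 + v)
      = K.map (fun k => f k + if a = k then v else 0) := by
  induction K generalizing idx with
  | nil => simp [PySem.List.index?] at hidx
  | cons k K ih =>
    rw [List.nodup_cons] at hnd
    by_cases hk : k = a
    · rcases hk with rfl
      rw [PySem.List.index?_cons_self] at hidx
      obtain rfl : (0 : Nat) = idx := Option.some.inj hidx
      simp only [List.map_cons, List.set_cons_zero, List.getD_cons_zero]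
      rw [if_pos trivial]
      congr 1
      refine List.map_congr_left (fun k' hk' => ?_)
      rw [if_neg (fun he => hnd.1 (by rw [he]; exact hk')), add_zero]
    · rw [PySem.List.index?_cons_of_ne _ hk] at hidx
      cases hj : PySem.List.index? K a with
      | none => rw [hj] at hidx; simp at hidx
      | some j =>
        rw [hj] at hidx
        simp only [Option.map_some, Option.some.injEq] at hidx
        obtain rfl : idx = j + 1 := hidx.symm
        simp only [List.map_cons, List.set_cons_succ, List.getD_cons_succ]
        rw [if_neg (fun he => hk he.symm), add_zero, ih j hnd.2 hj]

-- one step of A's state function advances the prefix by one row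
lemma step_state (pre : List (String × String × Int × String))
    (x : String × String × Int × String) :
    stepQ (stateOf pre) x = stateOf (pre ++ [x]) := by
  obtain ⟨s, t, v, c⟩ := x
  have hnd : (pre.foldl altSelect ([], [])).1.Nodup :=
    select_nodup pre ([], []) List.nodup_nil
  simp only [stateOf, stepQ, List.foldl_append, List.foldl_cons, List.foldl_nil, zip_proj]
  by_cases hv : v ≠ 0
  · rw [if_pos hv]
    by_cases hmem : (s, t) ∈ (pre.foldl altSelect ([], [])).1
    · -- duplicate key: A updates in place, B's pass 1 is unchanged, sums shift at (s,t)
      obtain ⟨idx, hidx⟩ : ∃ idx,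
          PySem.List.index? (pre.foldl altSelect ([], [])).1 (s, t) = some idx :=
        Option.isSome_iff_exists.mp ((PySem.List.index?_isSome_iff _ _).mpr hmem)
      rw [hidx]
      have hsel : altSelect (pre.foldl altSelect ([], [])) (s, t, v, c)
          = pre.foldl altSelect ([], []) := by
        simp only [altSelect]
        exact if_neg (fun hg => hg.2 hmem)
      rw [hsel]
      simp only [Prod.mk.injEq]
      refine ⟨trivial, trivial, ?_, trivial⟩
      rw [set_map _ idx (altSum pre) (s, t) v hnd hidx]
      exact (List.map_congr_left (fun k _ => sum_append_one pre (s, t, v, c) k)).symm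
    · -- new key: A appends, B's pass 1 appends, the new sum is v
      rw [(PySem.List.index?_eq_none_iff _ _).mpr hmem]
      have hsel : altSelect (pre.foldl altSelect ([], [])) (s, t, v, c)
          = ((pre.foldl altSelect ([], [])).1 ++ [(s, t)],
             (pre.foldl altSelect ([], [])).2 ++ [c]) := by
        simp only [altSelect]
        exact if_pos ⟨hv, hmem⟩
      rw [hsel]
      have hold : ((pre.foldl altSelect ([], [])).1 ++ [(s, t)]).map
            (altSum (pre ++ [(s, t, v, c)]))
          = (pre.foldl altSelect ([], [])).1.map (altSum pre) ++ [v] := by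
        rw [List.map_append]
        congr 1
        · exact List.map_congr_left (fun k hk => by
            rw [sum_append_one pre (s, t, v, c) k,
              if_neg (fun he => hmem (by rw [he]; exact hk)), add_zero])
        · have h0 : altSum pre (s, t) = 0 := by
            refine sum_zero pre (s, t) (fun r hr hk => by_contra (fun hval => ?_))
            exact hmem (hk ▸ select_complete pre ([], []) r hr hval)
          simp [sum_append_one pre (s, t, v, c) (s, t), h0]
      simp [hold]
  · -- value 0: both sides ignore the row; sums are unchanged since it contributes 0
    rw [if_neg hv]
    rw [not_not] at hv
    have hsel : altSelect (pre.foldl altSelect ([], [])) (s, t, v, c)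
        = pre.foldl altSelect ([], []) := by
      simp only [altSelect]
      exact if_neg (fun hg => hg.1 hv)
    rw [hsel]
    simp only [Prod.mk.injEq]
    refine ⟨trivial, trivial, ?_, trivial⟩
    exact (List.map_congr_left (fun k _ => by
      rw [sum_append_one pre (s, t, v, c) k, hv]
      simp)).symm

-- A's whole fold lands on B's two-pass result
lemma fold_state (xs pre : List (String × String × Int × String)) :
    xs.foldl stepQ (stateOf pre) = stateOf (pre ++ xs) := by
  induction xs generalizing pre with
  | nil => simp
  | cons x xs ih =>
    rw [List.foldl_cons, step_state pre x, ih (pre ++ [x])]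
    simp

-- ===== VERDICT (by name: the statement is the Claim_ definition above) =====
theorem clean_flow_spec : Claim_equal_clean_flow := by
  intro source target value flow_color _hdom hpre
  obtain ⟨h1, h2⟩ := hpre
  unfold Spec_clean_flow clean_flow clean_flow_alt
  have hz : (source.zip target).length = min source.length target.length :=
    List.length_zip
  rw [foldA source target value flow_color (by omega) (by omega)]
  have hempty : (([], [], [], []) : List String × List String × List Int × List String)
      = stateOf [] := by simp [stateOf]
  rw [hempty, fold_state _ []]
  simp [stateOf]
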